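-- pv_equiv track=rewrite | github.com/luck2333/Package | packagefiles/TableProcessing/Table_function/GetTable.py | table_Merge
-- ===== SOURCE A (Python) =====
-- def table_Merge(Table_1, Table_2):
--     col_table_1 = len(Table_1[0])
--     col_table_2 = len(Table_2[0])
--     # 列数相同就直接合并
--     if col_table_1 == col_table_2:
--         return Table_1+ Table_2
--     # 续表与前一页表格列不相同就先拓展再合并
--     elif col_table_1 > col_table_2:
--         extend_table = [['' for _ in range(len(Table_1[0]))]for _ in range(len(Table_2))]
--         # 对表进行填充
--         for i in range(len(extend_table)):
--             for j in range(len(extend_table[0])):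
--                 extend_table[i][j] = Table_2[i][j] if j < col_table_2 else Table_2[i][col_table_2 - 1]
--         return Table_1 + extend_table
-- ===== SOURCE B (Python) =====
-- def table_Merge(Table_1, Table_2):
--     c1 = len(Table_1[0])
--     c2 = len(Table_2[0])
--     if c1 == c2:
--         return Table_1 + Table_2
--     # column-major: pull out the first c2 columns, duplicate the last one, transpose back
--     cols = [[row[j] for row in Table_2] for j in range(c2)]
--     cols += [cols[-1]] * (c1 - c2)
--     return Table_1 + [list(t) for t in zip(*cols)]
-- ===== Notes on version B (the rewrite author's own statement) =====
-- stated objective: alternative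
-- what changed: B works column-major: it extracts the first c2 columns of Table_2, appends (c1-c2) copies of the last column, and transposes back with zip, instead of A's pre-allocated all-'' matrix filled row-by-row with a per-cell ternary.
-- outside the precondition, e.g. on table_Merge([['a']], [['x', 'y']]): A returns None, B returns [['a'], ['x', 'y']]; on table_Merge([], [['x']]): A raises IndexError, B raises IndexError; on table_Merge([['a', 'b', 'c']], [['x', 'y'], []]): A raises IndexError, B raises IndexError
import Mathlib
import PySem

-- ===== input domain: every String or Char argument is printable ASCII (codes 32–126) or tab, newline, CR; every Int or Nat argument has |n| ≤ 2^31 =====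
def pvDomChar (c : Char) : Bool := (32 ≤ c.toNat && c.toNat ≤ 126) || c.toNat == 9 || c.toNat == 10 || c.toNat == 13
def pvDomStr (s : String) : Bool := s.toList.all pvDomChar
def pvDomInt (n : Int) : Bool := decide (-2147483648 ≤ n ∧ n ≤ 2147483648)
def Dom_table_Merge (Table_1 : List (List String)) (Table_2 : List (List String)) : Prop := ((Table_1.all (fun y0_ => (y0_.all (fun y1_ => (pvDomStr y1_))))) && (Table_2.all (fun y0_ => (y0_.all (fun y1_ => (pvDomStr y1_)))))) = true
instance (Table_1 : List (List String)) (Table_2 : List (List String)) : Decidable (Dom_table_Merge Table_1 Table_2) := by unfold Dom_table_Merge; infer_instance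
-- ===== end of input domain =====

-- B builds the padded table column-major (extract columns, duplicate the last one, transpose
-- back with zip); A pre-allocates an all-'' matrix and fills it cell by cell with nested index
-- loops. Objective: alternative (same cost, different traversal).

-- ===== PORT A =====
-- the per-cell ternary:  Table_2[i][j] if j < col_table_2 else Table_2[i][col_table_2 - 1]
-- (indices are in range on every input admitted by Pre_; getD's defaults are never used there)
def pvFillCell (Table_2 : List (List String)) (c2 : Nat) (i j : Nat) : String :=
  if j < c2 then (Table_2.getD i []).getD j ""
  else (Table_2.getD i []).getD (c2 - 1) ""

def table_Merge (Table_1 : List (List String)) (Table_2 : List (List String)) : List (List String) :=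
  match Table_1, Table_2 with
  | r1 :: _, r2 :: _ =>
    let col_table_1 := r1.length
    let col_table_2 := r2.length
    if col_table_1 = col_table_2 then Table_1 ++ Table_2
    else if col_table_2 < col_table_1 then
      -- extend_table = [['' for _ in range(len(Table_1[0]))] for _ in range(len(Table_2))]
      let extend0 : List (List String) := Table_2.map (fun _ => List.replicate col_table_1 "")
      -- nested mutating fill loops, as foldl over the index ranges
      let ext : List (List String) :=
        (List.range extend0.length).foldl (fun ext i =>
          (List.range col_table_1).foldl (fun ext j =>
            ext.set i ((ext.getD i []).set j (pvFillCell Table_2 col_table_2 i j))) ext) extend0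
      Table_1 ++ ext
    else []  -- Python falls off the function and returns None here; excluded by Pre_
  | _, _ => []  -- Python raises IndexError on an empty table; excluded by Pre_

-- ===== PORT B =====
-- Python's zip(*cols): take one element from the head of every column until some column runs out
def pvZipStar : List (List String) → List (List String)
  | [] => []
  | c :: cs =>
    if h : ((c :: cs).all (fun x => !x.isEmpty)) = true then
      (c :: cs).map (fun x => x.headD "") :: pvZipStar ((c :: cs).map (fun x => x.tail))
    else []
termination_by cols => (cols.headD []).length
decreasing_by
  have hc : c ≠ [] := by
    simp only [List.all_cons, Bool.and_eq_true, Bool.not_eq_eq_eq_not, Bool.not_true] at h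
    intro hnil; subst hnil; simp at h
  rcases c with _ | ⟨x, xs⟩
  · exact absurd rfl hc
  · simp

def table_Merge_alt (Table_1 : List (List String)) (Table_2 : List (List String)) : List (List String) :=
  if Table_1.isEmpty || Table_2.isEmpty then []  -- Python raises IndexError on an empty table; excluded by Pre_
  else
    let c1 := (Table_1.headD []).length
    let c2 := (Table_2.headD []).length
    if c1 = c2 then Table_1 ++ Table_2
    else
      -- cols = [[row[j] for row in Table_2] for j in range(c2)]
      let cols := (List.range c2).map (fun j => Table_2.map (fun row => row.getD j ""))
      -- cols += [cols[-1]] * (c1 - c2)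
      let cols2 := cols ++ List.replicate (c1 - c2) (cols.getLastD [])
      -- Table_1 + [list(t) for t in zip(*cols)]
      Table_1 ++ pvZipStar cols2

-- ===== PRECONDITION & SPEC =====
-- Pre_ excludes: empty tables (A raises IndexError on Table_1[0]/Table_2[0]); the case
-- col_table_1 < col_table_2, where A falls off the function and returns None instead of a list;
-- and, when col_table_1 > col_table_2, tables whose second-table rows are shorter than
-- col_table_2 or with col_table_2 = 0, where A's fill loop raises IndexError.
def Pre_table_Merge (Table_1 : List (List String)) (Table_2 : List (List String)) : Prop :=
  Table_1 ≠ [] ∧ Table_2 ≠ [] ∧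
  (Table_2.headD []).length ≤ (Table_1.headD []).length ∧
  ((Table_1.headD []).length = (Table_2.headD []).length ∨
    (1 ≤ (Table_2.headD []).length ∧
     ∀ row ∈ Table_2, (Table_2.headD []).length ≤ row.length))

instance (Table_1 : List (List String)) (Table_2 : List (List String)) : Decidable (Pre_table_Merge Table_1 Table_2) := by
  unfold Pre_table_Merge; infer_instance

def pvWitness_table_Merge : List (List String) × List (List String) :=
  ([["a", "b", "c"]], [["x", "y"], ["p", "q", "r"]])

def Spec_table_Merge (Table_1 : List (List String)) (Table_2 : List (List String)) (out : List (List String)) : Prop := out = table_Merge_alt Table_1 Table_2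
instance (Table_1 : List (List String)) (Table_2 : List (List String)) (out : List (List String)) : Decidable (Spec_table_Merge Table_1 Table_2 out) := by unfold Spec_table_Merge; infer_instance

-- ===== CLAIM (what is proved, stated in full; the proofs are below) =====
def Claim_equal_table_Merge : Prop := ∀ (Table_1 : List (List String)) (Table_2 : List (List String)), Dom_table_Merge Table_1 Table_2 → Pre_table_Merge Table_1 Table_2 → Spec_table_Merge Table_1 Table_2 (table_Merge Table_1 Table_2)

-- ===== LEMMAS AND PROOFS =====

-- writing a slot's current content back is a no-op
theorem pv_set_getD_self {α : Type} (l : List α) (i : Nat) (d : α) :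
    l.set i (l.getD i d) = l := by
  by_cases h : i < l.length
  · apply List.ext_getElem
    · simp
    · intro j h1 h2
      rw [List.getElem_set]
      split
      · next hij => subst hij; exact List.getD_eq_getElem l d h
      · rfl
  · exact List.set_eq_of_length_le (by omega)

-- A's inner fill loop on row i equals one `set` of the row built by folding over the row itself
theorem pv_inner (i : Nat) (g : Nat → String) :
    ∀ (js : List Nat) (ext : List (List String)),
      js.foldl (fun ext j => ext.set i ((ext.getD i []).set j (g j))) ext
        = ext.set i (js.foldl (fun r j => r.set j (g j)) (ext.getD i [])) := by
  intro js
  induction js with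
  | nil =>
    intro ext
    simp only [List.foldl_nil]
    exact (pv_set_getD_self ext i []).symm
  | cons j js ih =>
    intro ext
    simp only [List.foldl_cons]
    rw [ih]
    by_cases h : i < ext.length
    · have hget : (ext.set i ((ext.getD i []).set j (g j))).getD i []
          = (ext.getD i []).set j (g j) := by
        rw [List.getD_eq_getElem _ _ (by simpa using h)]
        simp
      rw [hget, List.set_set]
    · have hid : ∀ v, ext.set i v = ext := fun v => List.set_eq_of_length_le (by omega)
      simp [hid]

-- generic shape of both of A's (rewritten) loops: fold of in-place `set`s over an initial index
-- segment, where the value written at slot i depends only on slot i's initial content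
theorem pv_foldl_set_range {α : Type} (F : α → Nat → α) (d : α) :
    ∀ (n : Nat) (r0 : List α), n ≤ r0.length →
      (List.range n).foldl (fun r i => r.set i (F (r.getD i d) i)) r0
        = (List.range n).map (fun i => F (r0.getD i d) i) ++ r0.drop n := by
  intro n
  induction n with
  | zero => intro r0 _; simp
  | succ m ih =>
    intro r0 hn
    have hm : m ≤ r0.length := Nat.le_of_succ_le hn
    have hlt : m < r0.length := hn
    rw [List.range_succ, List.foldl_append, List.map_append, ih r0 hm]
    have hlen : ((List.range m).map (fun i => F (r0.getD i d) i)).length = m := by simp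
    have hdrop : r0.drop m = r0[m] :: r0.drop (m + 1) := List.drop_eq_getElem_cons hlt
    have hgetD : ((List.range m).map (fun i => F (r0.getD i d) i) ++ r0.drop m).getD m d = r0[m] := by
      rw [List.getD_eq_getElem _ _ (by simp; omega), List.getElem_append_right (by omega)]
      simp
    simp only [List.foldl_cons, List.foldl_nil, hgetD]
    rw [List.set_append_right _ _ (by omega), hlen, Nat.sub_self, hdrop,
      List.set_cons_zero]
    simp [List.append_assoc, List.getElem?_eq_getElem hlt]

-- zip(*cols) on equal-length nonempty column lists is the index-wise transpose
theorem pv_zipStar_transpose :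
    ∀ (n : Nat) (cols : List (List String)), cols ≠ [] →
      (∀ c ∈ cols, c.length = n) →
      pvZipStar cols = (List.range n).map (fun i => cols.map (fun c => c.getD i "")) := by
  intro n
  induction n with
  | zero =>
    intro cols hne hlen
    rcases cols with _ | ⟨c, cs⟩
    · exact absurd rfl hne
    · have hc : c = [] := List.eq_nil_of_length_eq_zero (hlen c (by simp))
      subst hc
      rw [pvZipStar]
      simp
  | succ m ih =>
    intro cols hne hlen
    rcases cols with _ | ⟨c, cs⟩
    · exact absurd rfl hne
    have hall : ((c :: cs).all (fun x => !x.isEmpty)) = true := by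
      simp only [List.all_eq_true]
      intro c' hc'
      have := hlen c' hc'
      cases c' <;> simp_all
    rw [pvZipStar]
    simp only [hall, dif_pos]
    rw [ih ((c :: cs).map (fun x => x.tail)) (by simp)
        (by intro t ht
            simp only [List.mem_map] at ht
            obtain ⟨c', hc', rfl⟩ := ht
            have := hlen c' hc'
            simp [List.length_tail, this])]
    simp only [List.range_succ_eq_map, List.map_cons, List.map_map]
    congr 1
    · congr 1
      · have h := hlen c (by simp)
        rcases c with _ | ⟨x, xs⟩
        · simp at h
        · simp
      · apply List.map_congr_left
        intro c' hc'
        have h := hlen c' (by simp [hc'])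
        rcases c' with _ | ⟨x, xs⟩
        · simp at h
        · simp
    · apply List.map_congr_left
      intro i _
      simp only [Function.comp]
      congr 1
      · have h := hlen c (by simp)
        rcases c with _ | ⟨x, xs⟩
        · simp at h
        · simp
      · apply List.map_congr_left
        intro c' hc'
        have h := hlen c' (by simp [hc'])
        rcases c' with _ | ⟨x, xs⟩
        · simp at h
        · simp

-- the last of a mapped range with n ≥ 1 is the image of n-1
theorem pv_getLastD_map_range {α : Type} (F : Nat → α) (d : α) (n : Nat) (hn : 1 ≤ n) :
    ((List.range n).map F).getLastD d = F (n - 1) := by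
  obtain ⟨m, rfl⟩ : ∃ m, n = m + 1 := ⟨n - 1, by omega⟩
  rw [List.range_succ, List.map_append]
  simp

-- A's fill of one row equals the column-segment plus replicated last column value
theorem pv_row_eq (c1 c2 : Nat) (g : Nat → String) (hc : c2 ≤ c1) :
    (List.range c1).map (fun j => if j < c2 then g j else g (c2 - 1))
      = (List.range c2).map g ++ List.replicate (c1 - c2) (g (c2 - 1)) := by
  apply List.ext_getElem
  · simp; omega
  · intro i h1 h2
    simp only [List.getElem_map, List.getElem_range]
    by_cases hi : i < c2
    · rw [if_pos hi, List.getElem_append_left (by simp [hi])]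
      simp
    · rw [if_neg hi, List.getElem_append_right (by simp; omega)]
      simp

theorem table_Merge_eq (Table_1 Table_2 : List (List String))
    (hpre : Pre_table_Merge Table_1 Table_2) :
    table_Merge Table_1 Table_2 = table_Merge_alt Table_1 Table_2 := by
  obtain ⟨h1, h2, hle, hcase⟩ := hpre
  match Table_1, Table_2 with
  | [], _ => exact absurd rfl h1
  | _, [] => exact absurd rfl h2
  | r1 :: t1, r2 :: t2 =>
    simp only [List.headD_cons] at hle hcase
    by_cases heq : r1.length = r2.length
    · simp [table_Merge, table_Merge_alt, heq]
    · have hlt : r2.length < r1.length := lt_of_le_of_ne hle (fun h => heq h.symm)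
      obtain ⟨hc2, hrows⟩ := hcase.resolve_left heq
      simp only [table_Merge, table_Merge_alt, List.isEmpty_cons, Bool.or_self,
        Bool.false_eq_true, if_false, List.headD_cons, if_neg heq, if_pos hlt]
      congr 1
      set c1 := r1.length
      set c2 := r2.length
      set T2 := r2 :: t2 with hT2
      -- B side: the columns all have length T2.length, and there is at least one column
      set cols := (List.range c2).map (fun j => T2.map (fun row => row.getD j "")) with hcols
      have hlast : cols.getLastD [] = T2.map (fun row => row.getD (c2 - 1) "") :=
        pv_getLastD_map_range _ [] c2 hc2
      have hcolsne : cols ++ List.replicate (c1 - c2) (cols.getLastD []) ≠ [] := by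
        simp [hcols]; omega
      have hcollen : ∀ c ∈ cols ++ List.replicate (c1 - c2) (cols.getLastD []), c.length = T2.length := by
        intro c hc
        rcases List.mem_append.1 hc with h | h
        · simp only [hcols, List.mem_map] at h
          obtain ⟨j, _, rfl⟩ := h
          simp
        · rw [List.eq_of_mem_replicate h, hlast]
          simp
      rw [pv_zipStar_transpose T2.length _ hcolsne hcollen]
      -- A side: rewrite the nested loops into a map over row indices
      simp only [pv_inner]
      have hext0len : (T2.map (fun _ => List.replicate c1 "")).length = T2.length := by simp
      rw [hext0len,
        pv_foldl_set_range (fun r i => (List.range c1).foldl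
          (fun r j => r.set j (pvFillCell T2 c2 i j)) r) []
          T2.length (T2.map (fun _ => List.replicate c1 "")) (le_of_eq hext0len.symm),
        List.drop_of_length_le (le_of_eq hext0len), List.append_nil]
      apply List.map_congr_left
      intro i hi
      have hiT : i < T2.length := List.mem_range.1 hi
      have hget0 : (T2.map (fun _ => List.replicate c1 "")).getD i [] = List.replicate c1 "" := by
        rw [List.getD_eq_getElem _ _ (by simpa using hiT)]; simp
      rw [hget0]
      have hinner := pv_foldl_set_range (fun _ j => pvFillCell T2 c2 i j) ""
        c1 (List.replicate c1 "") (by simp)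
      rw [List.drop_of_length_le (by simp), List.append_nil] at hinner
      rw [hinner]
      have hrow : T2[i]? = some T2[i] := List.getElem?_eq_getElem hiT
      have hfill : ∀ j, pvFillCell T2 c2 i j
          = (if j < c2 then T2[i].getD j "" else T2[i].getD (c2 - 1) "") := by
        intro j; simp [pvFillCell, List.getD, hrow]
      calc (List.range c1).map (fun j => pvFillCell T2 c2 i j)
          = (List.range c1).map (fun j => if j < c2 then T2[i].getD j "" else T2[i].getD (c2 - 1) "") := by
            simp only [hfill]
        _ = (List.range c2).map (fun j => T2[i].getD j "") ++
              List.replicate (c1 - c2) (T2[i].getD (c2 - 1) "") :=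
            pv_row_eq c1 c2 (fun j => T2[i].getD j "") (le_of_lt hlt)
        _ = (cols ++ List.replicate (c1 - c2) (cols.getLastD [])).map (fun c => c.getD i "") := by
            rw [List.map_append, hlast, hcols, List.map_map, List.map_replicate]
            congr 1
            · apply List.map_congr_left
              intro j _
              simp only [Function.comp]
              rw [List.getD_eq_getElem (T2.map _) "" (by simpa using hiT)]
              simp
            · congr 1
              rw [List.getD_eq_getElem (T2.map _) "" (by simpa using hiT)]
              simp

-- ===== VERDICT (by name: the statement is the Claim_ definition above) =====
theorem table_Merge_spec : Claim_equal_table_Merge := by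
  intro T1 T2 _ hpre
  unfold Spec_table_Merge
  exact table_Merge_eq T1 T2 hpre
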